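-- pv_equiv track=rewrite | github.com/ThomasCZhang/CMU-02604-Bioinformatics-Spring2023 | Week11 (Burrows Wheeler)/BWTDecode.py | GetCharPositions
-- ===== SOURCE A (Python) =====
-- def GetCharPositions(word: str) -> dict[str, dict[int, int]]:
--     """
--     gets the indicies that each unique character in a word appears at.
--     Input:
--         word: The word being analyzed
--     """
--     char_idx_dict = {}
--     for i, letter in enumerate(word):
--         if letter in char_idx_dict:
--             order = len(char_idx_dict[letter])
--             char_idx_dict[letter][i] = order
--         else:
--             char_idx_dict[letter] = {i: 0}
--     return char_idx_dict
-- ===== SOURCE B (Python) =====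
-- def GetCharPositions(word: str) -> dict[str, dict[int, int]]:
--     """
--     gets the indicies that each unique character in a word appears at.
--     Input:
--         word: The word being analyzed
--     """
--     groups = {}
--     for i, letter in enumerate(word):
--         groups.setdefault(letter, []).append(i)
--     return {letter: {idx: rank for rank, idx in enumerate(idxs)}
--             for letter, idxs in groups.items()}
-- ===== Notes on version B (the rewrite author's own statement) =====
-- stated objective: alternative
-- what changed: Instead of maintaining nested per-character rank dicts inline during the scan, B first groups each character's occurrence indices into lists (setdefault/append) and then builds each inner {index: rank} dict in a second pass by enumerating the index list.
import Mathlib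
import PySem

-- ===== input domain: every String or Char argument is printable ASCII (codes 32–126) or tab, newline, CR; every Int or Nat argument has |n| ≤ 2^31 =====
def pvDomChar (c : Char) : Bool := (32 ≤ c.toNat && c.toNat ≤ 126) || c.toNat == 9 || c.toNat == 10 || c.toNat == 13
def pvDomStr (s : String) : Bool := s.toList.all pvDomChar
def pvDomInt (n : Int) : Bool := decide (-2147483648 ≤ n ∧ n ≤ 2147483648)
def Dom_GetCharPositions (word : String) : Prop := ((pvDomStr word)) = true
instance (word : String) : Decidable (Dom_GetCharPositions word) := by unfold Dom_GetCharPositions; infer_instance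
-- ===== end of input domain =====

-- B groups each character's occurrence indices first and ranks them in a second pass; A builds
-- the nested rank dicts inline in one pass. Same return value; objective: alternative decomposition.

-- ===== PORT A =====
def GetCharPositions (word : String) : List (String × List (Int × Int)) :=
  ((PySem.List.enumerate word.toList 0).foldl
    (fun d p =>
      let letter := String.singleton p.2
      if d.contains letter then
        -- order = len(char_idx_dict[letter]); char_idx_dict[letter][i] = order
        let inner := d.getD letter PySem.Dict.empty
        d.insert letter (inner.insert p.1 (inner.size : Int))
      else
        -- char_idx_dict[letter] = {i: 0}
        d.insert letter (PySem.Dict.ofList [(p.1, 0)]))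
    PySem.Dict.empty).items.map (fun q => (q.1, q.2.items))

-- ===== PORT B =====
-- {idx: rank for rank, idx in enumerate(idxs)} as an association list
def rankPairs (l : List Int) : List (Int × Int) :=
  (PySem.List.enumerate l 0).map (fun r => (r.2, r.1))

def GetCharPositions_alt (word : String) : List (String × List (Int × Int)) :=
  ((PySem.List.enumerate word.toList 0).foldl
    (fun g p => g.modify (String.singleton p.2) [] (· ++ [p.1]))
    PySem.Dict.empty).items.map (fun q => (q.1, rankPairs q.2))

-- ===== PRECONDITION & SPEC =====
def Spec_GetCharPositions (word : String) (out : List (String × List (Int × Int))) : Prop := out = GetCharPositions_alt word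
instance (word : String) (out : List (String × List (Int × Int))) : Decidable (Spec_GetCharPositions word out) := by unfold Spec_GetCharPositions; infer_instance

-- ===== CLAIM (what is proved, stated in full; the proofs are below) =====
def Claim_equal_GetCharPositions : Prop := ∀ (word : String), Dom_GetCharPositions word → Spec_GetCharPositions word (GetCharPositions word)

-- ===== LEMMAS AND PROOFS =====

-- A's inner dict for a character whose index list is l is the dict of rankPairs l
def pvF (q : String × List Int) : String × PySem.Dict Int Int :=
  (q.1, PySem.Dict.mk (rankPairs q.2))

lemma pv_contains_map (g : PySem.Dict String (List Int)) (k : String) :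
    (PySem.Dict.mk (g.items.map pvF)).contains k = g.contains k := by
  simp [PySem.Dict.contains, List.any_map, Function.comp_def, pvF]

lemma pv_get?_map (g : PySem.Dict String (List Int)) (k : String) :
    (PySem.Dict.mk (g.items.map pvF)).get? k
      = (g.get? k).map (fun l => PySem.Dict.mk (rankPairs l)) := by
  simp [PySem.Dict.get?, List.find?_map, Option.map_map, Function.comp_def, pvF]

lemma pv_rankPairs_append (l : List Int) (j : Int) :
    rankPairs (l ++ [j]) = rankPairs l ++ [(j, (l.length : Int))] := by
  simp [rankPairs, PySem.List.enumerate_append, PySem.List.enumerate_cons,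
        PySem.List.enumerate_nil]

lemma pv_length_rankPairs (l : List Int) : (rankPairs l).length = l.length := by
  simp [rankPairs, PySem.List.length_enumerate]

lemma pv_contains_rank (l : List Int) (j : Int) (h : ∀ x ∈ l, x ≠ j) :
    (PySem.Dict.mk (rankPairs l)).contains j = false := by
  simp only [PySem.Dict.contains, rankPairs, List.any_map, List.any_eq_false,
             Function.comp_def]
  intro p hp
  obtain ⟨k, hk, rfl⟩ := (PySem.List.mem_enumerate_iff l 0 p).mp hp
  simpa using h _ (List.getElem_mem hk)

lemma pv_main (cs : List Char) : ∀ (s : Int) (g : PySem.Dict String (List Int)),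
    (∀ q ∈ g.items, ∀ j ∈ q.2, j < s) →
    ((PySem.List.enumerate cs s).foldl
      (fun d p =>
        let letter := String.singleton p.2
        if d.contains letter then
          let inner := d.getD letter PySem.Dict.empty
          d.insert letter (inner.insert p.1 (inner.size : Int))
        else
          d.insert letter (PySem.Dict.ofList [(p.1, 0)]))
      (PySem.Dict.mk (g.items.map pvF))).items
    = (((PySem.List.enumerate cs s).foldl
        (fun g p => g.modify (String.singleton p.2) [] (· ++ [p.1])) g).items).map pvF := by
  induction cs with
  | nil => intro s g _; simp [PySem.List.enumerate_nil]
  | cons c cs ih =>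
    intro s g hb
    rw [PySem.List.enumerate_cons]
    simp only [List.foldl_cons]
    by_cases hc : g.contains (String.singleton c) = true
    · -- letter already present
      obtain ⟨l, hl⟩ : ∃ l, g.get? (String.singleton c) = some l := by
        have h1 := PySem.Dict.contains_eq_isSome_get? g (String.singleton c)
        rw [hc] at h1
        exact Option.isSome_iff_exists.mp h1.symm
      have hmem : (String.singleton c, l) ∈ g.items :=
        PySem.Dict.mem_items_of_get?_eq_some g hl
      have hlb : ∀ j ∈ l, j < s := hb _ hmem
      have hcontA : (PySem.Dict.mk (g.items.map pvF)).contains (String.singleton c) = true := by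
        rw [pv_contains_map]; exact hc
      have hgetA : (PySem.Dict.mk (g.items.map pvF)).getD (String.singleton c) PySem.Dict.empty
          = PySem.Dict.mk (rankPairs l) := by
        rw [PySem.Dict.getD_eq_get?_getD, pv_get?_map, hl]; rfl
      have hinner : (PySem.Dict.mk (rankPairs l)).insert s
            (((PySem.Dict.mk (rankPairs l)).size : Int))
          = PySem.Dict.mk (rankPairs (l ++ [s])) := by
        have hcf : (PySem.Dict.mk (rankPairs l)).contains s = false :=
          pv_contains_rank l s (fun x hx => ne_of_lt (hlb x hx))
        rw [PySem.Dict.insert, hcf]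
        simp [PySem.Dict.size, pv_length_rankPairs, pv_rankPairs_append]
      have hstepB : g.modify (String.singleton c) [] (· ++ [s])
          = PySem.Dict.mk (g.items.map
              (fun q => if q.1 == String.singleton c then (String.singleton c, l ++ [s]) else q)) := by
        rw [PySem.Dict.modify, PySem.Dict.getD_eq_get?_getD, hl]
        rw [PySem.Dict.insert]
        rw [if_pos hc]
        rfl
      have hstepA : (PySem.Dict.mk (g.items.map pvF)).insert (String.singleton c)
            ((PySem.Dict.mk (g.items.map pvF)).getD (String.singleton c) PySem.Dict.empty |>.insert s
              (((PySem.Dict.mk (g.items.map pvF)).getD (String.singleton c) PySem.Dict.empty).size : Int))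
          = PySem.Dict.mk (((g.modify (String.singleton c) [] (· ++ [s]))).items.map pvF) := by
        rw [hgetA, hinner, PySem.Dict.insert, if_pos hcontA, hstepB]
        apply PySem.Dict.ext
        simp only [List.map_map]
        apply List.map_congr_left
        intro q _
        by_cases hq : q.1 = String.singleton c <;> simp [pvF, hq]
      have hbound : ∀ q ∈ (g.modify (String.singleton c) [] (· ++ [s])).items,
          ∀ j ∈ q.2, j < s + 1 := by
        rw [hstepB]
        intro q hq j hj
        simp only [List.mem_map] at hq
        obtain ⟨q', hq', rfl⟩ := hq
        by_cases h' : q'.1 == String.singleton c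
        · simp only [if_pos h'] at hj
          rcases List.mem_append.mp hj with h1 | h1
          · exact lt_trans (hlb _ h1) (by omega)
          · simp at h1; omega
        · simp only [if_neg h'] at hj
          exact lt_trans (hb _ hq' _ hj) (by omega)
      simp only [hcontA, if_true]
      rw [hstepA]
      exact ih (s+1) _ hbound
    · -- new letter
      have hcB : g.contains (String.singleton c) = false := by simpa using hc
      have hcontA : (PySem.Dict.mk (g.items.map pvF)).contains (String.singleton c) = false := by
        rw [pv_contains_map]; exact hcB
      have hstepB : g.modify (String.singleton c) [] (· ++ [s])
          = PySem.Dict.mk (g.items ++ [(String.singleton c, [s])]) := by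
        rw [PySem.Dict.modify, PySem.Dict.getD_of_not_contains g [] hcB,
            PySem.Dict.insert, if_neg (by simp [hcB])]
        rfl
      have hstepA : (PySem.Dict.mk (g.items.map pvF)).insert (String.singleton c)
            (PySem.Dict.ofList [((s : Int), (0 : Int))])
          = PySem.Dict.mk (((g.modify (String.singleton c) [] (· ++ [s]))).items.map pvF) := by
        rw [PySem.Dict.insert, if_neg (by simp [hcontA]), hstepB]
        apply PySem.Dict.ext
        simp only [List.map_append]
        rfl
      have hbound : ∀ q ∈ (g.modify (String.singleton c) [] (· ++ [s])).items,
          ∀ j ∈ q.2, j < s + 1 := by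
        rw [hstepB]
        intro q hq j hj
        simp only [List.mem_append, List.mem_singleton] at hq
        rcases hq with h1 | h1
        · exact lt_trans (hb _ h1 _ hj) (by omega)
        · subst h1; simp at hj; omega
      simp only [hcontA, if_neg (by simp : ¬ (false = true))]
      rw [hstepA]
      exact ih (s+1) _ hbound

-- ===== VERDICT (by name: the statement is the Claim_ definition above) =====
theorem GetCharPositions_spec : Claim_equal_GetCharPositions := by
  intro word _
  unfold Spec_GetCharPositions GetCharPositions GetCharPositions_alt
  have h := pv_main word.toList 0 PySem.Dict.empty (by intro q hq; simp [PySem.Dict.empty] at hq)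
  have he : PySem.Dict.mk ((PySem.Dict.empty : PySem.Dict String (List Int)).items.map pvF)
      = (PySem.Dict.empty : PySem.Dict String (PySem.Dict Int Int)) := rfl
  rw [he] at h
  rw [h, List.map_map]
  apply List.map_congr_left
  intro q _
  rfl
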